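-- pv_equiv track=rewrite | github.com/huangziwei/ptts | ptts/tts.py | _trim_span
-- ===== SOURCE A (Python) =====
-- from typing import Any, Dict, Iterator, List, Optional, Sequence, Tuple
--
-- def _trim_span(text: str, start: int, end: int) -> Optional[Tuple[int, int]]:
--     while start < end and text[start].isspace():
--         start += 1
--     while end > start and text[end - 1].isspace():
--         end -= 1
--     if start >= end:
--         return None
--     return start, end
-- ===== SOURCE B (Python) =====
-- def _trim_span(text, start, end):
--     sub = text[start:end]
--     new_start = start + (len(sub) - len(sub.lstrip()))
--     new_end = end - (len(sub) - len(sub.rstrip()))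
--     if new_start >= new_end:
--         return None
--     return new_start, new_end
-- ===== Notes on version B (the rewrite author's own statement) =====
-- stated objective: simpler
-- what changed: Replaced the two index-advancing while loops with one slice of the span plus substring-length arithmetic over lstrip/rstrip (new_start = start + stripped-leading length, new_end = end - stripped-trailing length), keeping the new_start >= new_end -> None check.
-- outside the precondition, e.g. on _trim_span('  ', -1, 2): A returns None, B returns (0, 1)
import Mathlib
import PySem

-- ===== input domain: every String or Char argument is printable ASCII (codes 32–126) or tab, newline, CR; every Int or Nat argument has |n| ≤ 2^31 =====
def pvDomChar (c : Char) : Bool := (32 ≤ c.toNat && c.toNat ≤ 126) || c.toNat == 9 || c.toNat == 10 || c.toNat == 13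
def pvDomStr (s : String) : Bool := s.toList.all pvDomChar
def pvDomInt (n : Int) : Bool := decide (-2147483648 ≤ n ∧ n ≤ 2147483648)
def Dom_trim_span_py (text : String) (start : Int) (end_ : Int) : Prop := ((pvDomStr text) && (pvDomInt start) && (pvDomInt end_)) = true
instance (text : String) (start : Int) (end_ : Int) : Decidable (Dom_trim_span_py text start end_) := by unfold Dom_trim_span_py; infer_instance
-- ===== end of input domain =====

-- B replaces A's two index-advancing while loops by slicing the span once and doing
-- substring-length arithmetic over lstrip/rstrip (simpler decomposition, same cost).


-- ===== PORT A =====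
-- first while loop: advance start over whitespace (pyGet? none = Python IndexError, outside Pre_)
def trimLeftA (cs : List Char) (start end_ : Int) : Int :=
  if _h : start < end_ then
    match PySem.List.pyGet? cs start with
    | some c => if PySem.Chars.isspace c then trimLeftA cs (start + 1) end_ else start
    | none => start
  else start
termination_by (end_ - start).toNat
decreasing_by omega

-- second while loop: retreat end over whitespace
def trimRightA (cs : List Char) (start end_ : Int) : Int :=
  if _h : end_ > start then
    match PySem.List.pyGet? cs (end_ - 1) with
    | some c => if PySem.Chars.isspace c then trimRightA cs start (end_ - 1) else end_
    | none => end_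
  else end_
termination_by (end_ - start).toNat
decreasing_by omega

def trim_span_py (text : String) (start : Int) (end_ : Int) : Option (Int × Int) :=
  let cs := text.toList
  let s1 := trimLeftA cs start end_
  let e1 := trimRightA cs s1 end_
  if s1 ≥ e1 then none else some (s1, e1)

-- ===== PORT B =====
def trim_span_py_alt (text : String) (start : Int) (end_ : Int) : Option (Int × Int) :=
  let sub := PySem.List.slice text.toList (some start) (some end_)
  let leading : Int := (sub.length : Int) - ((PySem.Chars.lstrip sub).length : Int)
  let trailing : Int := (sub.length : Int) - ((PySem.Chars.rstrip sub).length : Int)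
  let new_start := start + leading
  let new_end := end_ - trailing
  if new_start ≥ new_end then none else some (new_start, new_end)

-- ===== PRECONDITION & SPEC =====
-- Pre_ excludes spans start < end whose endpoints are not plain in-range offsets (0 ≤ start, end ≤ len(text)):
-- there A either raises IndexError or its value depends on negative-index wraparound, an accidental corner
-- two incompatible readings of which coexist even inside A (raw comparison vs wrapped indexing).
def Pre_trim_span_py (text : String) (start : Int) (end_ : Int) : Prop :=
  start < end_ → (0 ≤ start ∧ end_ ≤ (text.toList.length : Int))
instance (text : String) (start : Int) (end_ : Int) : Decidable (Pre_trim_span_py text start end_) := by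
  unfold Pre_trim_span_py; infer_instance

def pvWitness_trim_span_py : String × Int × Int := ("  hi ", 0, 5)

def Spec_trim_span_py (text : String) (start : Int) (end_ : Int) (out : Option (Int × Int)) : Prop := out = trim_span_py_alt text start end_
instance (text : String) (start : Int) (end_ : Int) (out : Option (Int × Int)) : Decidable (Spec_trim_span_py text start end_ out) := by unfold Spec_trim_span_py; infer_instance

-- ===== CLAIM (what is proved, stated in full; the proofs are below) =====
def Claim_equal_trim_span_py : Prop := ∀ (text : String) (start : Int) (end_ : Int), Dom_trim_span_py text start end_ → Pre_trim_span_py text start end_ → Spec_trim_span_py text start end_ (trim_span_py text start end_)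

-- ===== LEMMAS AND PROOFS =====

lemma pyGet?_in (cs : List Char) (s : Int) (h0 : 0 ≤ s) (h1 : s < (cs.length : Int)) :
    PySem.List.pyGet? cs s = some (cs.getD s.toNat 'x') := by
  simp only [PySem.List.pyGet?, PySem.List.pyIdx?, if_pos h0, if_pos h1, Option.bind_some]
  rw [List.getElem?_eq_getElem (by omega), List.getD_eq_getElem _ _ (by omega)]

lemma trimLeftA_eq (cs : List Char) (n : Nat) : ∀ (s e : Int), n = (e - s).toNat → 0 ≤ s → e ≤ (cs.length : Int) →
    trimLeftA cs s e = s + ((((cs.drop s.toNat).take (e - s).toNat).takeWhile PySem.Chars.isspace).length : Int) := by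
  induction n with
  | zero =>
    intro s e hn h0 hl
    have he : ¬ s < e := by omega
    have : (e - s).toNat = 0 := by omega
    rw [trimLeftA, dif_neg he, this]
    simp
  | succ k ih =>
    intro s e hn h0 hl
    have he : s < e := by omega
    have hlt : s < (cs.length : Int) := by omega
    rw [trimLeftA, dif_pos he, pyGet?_in cs s h0 hlt]
    have hdrop : cs.drop s.toNat = cs.getD s.toNat 'x' :: cs.drop (s.toNat + 1) := by
      rw [List.getD_eq_getElem _ _ (by omega), List.drop_eq_getElem_cons (by omega)]
    have htk : (e - s).toNat = ((e - (s+1)).toNat) + 1 := by omega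
    rw [hdrop, htk, List.take_succ_cons]
    by_cases hsp : PySem.Chars.isspace (cs.getD s.toNat 'x')
    · simp only [hsp, if_true, List.takeWhile_cons_of_pos hsp]
      rw [ih (s+1) e (by omega) (by omega) hl]
      have : (s+1).toNat = s.toNat + 1 := by omega
      rw [this]
      simp; omega
    · simp only [hsp]
      rw [List.takeWhile_cons_of_neg (by simpa using hsp)]
      simp

lemma trimRightA_eq (cs : List Char) (n : Nat) : ∀ (s e : Int), n = (e - s).toNat → 0 ≤ s → e ≤ (cs.length : Int) →
    trimRightA cs s e = e - ((((cs.drop s.toNat).take (e - s).toNat).reverse.takeWhile PySem.Chars.isspace).length : Int) := by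
  induction n with
  | zero =>
    intro s e hn h0 hl
    have he : ¬ e > s := by omega
    have h2 : (e - s).toNat = 0 := by omega
    rw [trimRightA, dif_neg he, h2]
    simp
  | succ k ih =>
    intro s e hn h0 hl
    have he : e > s := by omega
    rw [trimRightA, dif_pos he, pyGet?_in cs (e-1) (by omega) (by omega)]
    -- decompose the slice as prefix ++ [last]
    have hlen : s.toNat + (e - s).toNat - 1 < cs.length := by omega
    have htk : (e - s).toNat = ((e - 1 - s).toNat) + 1 := by omega
    have hsplit : (cs.drop s.toNat).take (e - s).toNat
        = (cs.drop s.toNat).take (e - 1 - s).toNat ++ [cs.getD (e-1).toNat 'x'] := by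
      rw [htk, List.take_add_one]
      congr 1
      have hidx : s.toNat + (e - 1 - s).toNat = (e-1).toNat := by omega
      rw [List.getElem?_drop, hidx, List.getElem?_eq_getElem (show (e-1).toNat < cs.length by omega),
          List.getD_eq_getElem _ _ (show (e-1).toNat < cs.length by omega)]
      rfl
    rw [hsplit, List.reverse_append, List.reverse_singleton, List.singleton_append]
    by_cases hsp : PySem.Chars.isspace (cs.getD (e-1).toNat 'x')
    · simp only [hsp, if_true, List.takeWhile_cons_of_pos hsp]
      rw [ih s (e-1) (by omega) h0 (by omega)]
      simp; omega
    · simp only [hsp]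
      rw [List.takeWhile_cons_of_neg (by simpa using hsp)]
      simp

-- ===== VERDICT (by name: the statement is the Claim_ definition above) =====
theorem trim_span_py_spec : Claim_equal_trim_span_py := by
  intro text start end_ _hdom hpre
  unfold Spec_trim_span_py
  unfold Pre_trim_span_py at hpre
  set cs := text.toList with hcs
  set p := PySem.Chars.isspace with hp
  by_cases hse : start < end_
  · obtain ⟨h0, hl⟩ := hpre hse
    set m : Nat := (end_ - start).toNat with hm
    set sub : List Char := (cs.drop start.toNat).take m with hsub
    set tw : List Char := sub.takeWhile p with htw
    set dw : List Char := sub.dropWhile p with hdw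
    have hsublen : sub.length = m := by
      rw [hsub, List.length_take, List.length_drop]; omega
    have htd : tw ++ dw = sub := List.takeWhile_append_dropWhile
    have hlensum : tw.length + dw.length = sub.length := by
      rw [← htd, List.length_append]
    have htwle : tw.length ≤ m := by omega
    -- B's slice is sub
    have hslice : PySem.List.slice cs (some start) (some end_) = sub := by
      rw [PySem.List.slice_toNat cs h0 (by omega)]
      rw [hsub]
      congr 1
      omega
    -- A's first loop
    have hs1 : trimLeftA cs start end_ = start + (tw.length : Int) :=
      trimLeftA_eq cs m start end_ rfl h0 hl
    -- A's second loop: its span is dw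
    have hsub2 : (cs.drop (start + tw.length).toNat).take (end_ - (start + tw.length)).toNat = dw := by
      have h1 : (start + (tw.length : Int)).toNat = start.toNat + tw.length := by omega
      have h2 : (end_ - (start + (tw.length : Int))).toNat = m - tw.length := by omega
      rw [h1, h2]
      calc List.take (m - tw.length) (List.drop (start.toNat + tw.length) cs)
          = List.take (m - tw.length) (List.drop tw.length (List.drop start.toNat cs)) := by
            rw [List.drop_drop]
        _ = List.drop tw.length ((List.drop start.toNat cs).take m) := by rw [List.drop_take]
        _ = List.drop tw.length (tw ++ dw) := by rw [← hsub, htd]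
        _ = dw := by simp
    have he1 : trimRightA cs (start + tw.length) end_
        = end_ - ((dw.reverse.takeWhile p).length : Int) := by
      rw [trimRightA_eq cs (end_ - (start + tw.length)).toNat (start + tw.length) end_ rfl (by omega) hl, hsub2]
    -- relate trailing whitespace of sub and dw
    by_cases hall : dw = []
    · -- all-whitespace span
      have htweq : tw.length = m := by
        rw [hall] at hlensum; simp at hlensum; omega
      have hrevnil : sub.reverse.dropWhile p = [] := by
        rw [List.dropWhile_eq_nil_iff]
        intro x hx
        exact (List.dropWhile_eq_nil_iff.mp hall) x (List.mem_reverse.mp hx)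
      -- A returns none
      rw [trim_span_py, trim_span_py_alt]
      simp only [← hcs, hslice, hs1, he1, hall]
      rw [PySem.Chars.lstrip, PySem.Chars.rstrip, ← hdw, hall, hrevnil]
      simp only [List.length_nil, List.length_reverse]
      rw [if_pos (by omega), if_pos (by omega)]
    · -- span has a non-space: trailing runs agree
      have hhead : p (dw.head hall) = false := List.head_dropWhile_not p hall
      have hne : sub.reverse.takeWhile p = dw.reverse.takeWhile p := by
        rw [← htd, List.reverse_append, List.takeWhile_append, if_neg]
        intro hlen
        have : dw.reverse.takeWhile p = dw.reverse := by
          refine List.Sublist.eq_of_length (List.takeWhile_sublist _) ?_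
          simpa using hlen
        have hall' := List.takeWhile_eq_self_iff.mp this
        have := hall' (dw.head hall) (List.mem_reverse.mpr (List.head_mem hall))
        rw [hhead] at this
        exact Bool.false_ne_true this
      have hrw : sub.length - (sub.reverse.dropWhile p).length = (dw.reverse.takeWhile p).length := by
        have h1 : (sub.reverse.takeWhile p).length + (sub.reverse.dropWhile p).length = sub.length := by
          rw [← List.length_append, List.takeWhile_append_dropWhile, List.length_reverse]
        rw [← hne]; omega
      rw [trim_span_py, trim_span_py_alt]
      simp only [← hcs, hslice, hs1, he1]
      rw [PySem.Chars.lstrip, PySem.Chars.rstrip, ← hdw]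
      have hdrople : (sub.reverse.dropWhile p).length ≤ sub.length := by
        have := List.length_dropWhile_le p sub.reverse
        rw [List.length_reverse] at this; exact le_trans this (le_refl _)
      have hcast : (sub.length : Int) - ((sub.reverse.dropWhile p).reverse.length : Int)
          = ((dw.reverse.takeWhile p).length : Int) := by
        rw [List.length_reverse]; omega
      rw [hcast]
      have harith : start + ((sub.length : Int) - (dw.length : Int)) = start + (tw.length : Int) := by omega
      rw [harith]
  · have hA1 : trimLeftA cs start end_ = start := by rw [trimLeftA, dif_neg hse]
    have hA2 : trimRightA cs start end_ = end_ := by rw [trimRightA, dif_neg (by omega)]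
    rw [trim_span_py, trim_span_py_alt]
    simp only [← hcs, hA1, hA2]
    set S : List Char := PySem.List.slice cs (some start) (some end_) with hS
    have e1 : (PySem.Chars.lstrip S).length ≤ S.length := by
      rw [PySem.Chars.lstrip]; exact List.length_dropWhile_le _ _
    have e2 : (PySem.Chars.rstrip S).length ≤ S.length := by
      rw [PySem.Chars.rstrip]
      have := List.length_dropWhile_le PySem.Chars.isspace S.reverse
      simpa using this
    rw [if_pos (by omega), if_pos (by omega)]
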